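-- pv_equiv track=rewrite | github.com/hunter4983/Frequency-Analisys | FAlib.py | word_tokenize
-- ===== SOURCE A (Python) =====
-- def check_mark(char):
--     if char in ['?', '!', '.']:
--         return True
--     return False
--
-- def word_tokenize(sentence):
--     chars = ""
--     words = []
--     for char in sentence:
--         chars += char
--         if char == " " or check_mark(char):
--             words.append(chars.strip())
--             chars = ""
--
--     return words
-- ===== SOURCE B (Python) =====
-- def word_tokenize(sentence):
--     DELIMS = " ?!."
--     words = []
--     s = sentence
--     while True:
--         k = 0
--         while k < len(s) and s[k] not in DELIMS:
--             k += 1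
--         if k == len(s):
--             return words
--         words.append(s[:k + 1].strip())
--         s = s[k + 1:]
-- ===== Notes on version B (the rewrite author's own statement) =====
-- stated objective: alternative
-- what changed: Replaces A's single char-by-char pass with a growing accumulator string by an outer loop over tokens: scan to the next delimiter, slice out the whole token at once (strip), and continue on the remainder.
import Mathlib
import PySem

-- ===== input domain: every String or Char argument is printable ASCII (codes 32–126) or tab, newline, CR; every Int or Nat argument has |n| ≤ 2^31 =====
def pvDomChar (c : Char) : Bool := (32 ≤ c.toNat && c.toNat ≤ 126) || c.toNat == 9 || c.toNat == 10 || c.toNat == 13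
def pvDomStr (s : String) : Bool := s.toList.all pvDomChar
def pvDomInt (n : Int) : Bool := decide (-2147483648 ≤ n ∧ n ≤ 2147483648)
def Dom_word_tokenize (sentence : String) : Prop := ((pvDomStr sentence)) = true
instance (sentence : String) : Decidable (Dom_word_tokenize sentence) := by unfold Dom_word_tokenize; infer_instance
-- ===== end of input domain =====

-- B replaces A's char-by-char accumulator pass by an outer loop over tokens (scan to next delimiter, slice, strip); alternative decomposition, same cost.


-- ===== PORT A =====
def check_mark (char : Char) : Bool :=
  if char ∈ ['?', '!', '.'] then true else false

-- body of A's for-loop: chars += char; conditional append of chars.strip()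
def wtA_step (st : List Char × List String) (char : Char) : List Char × List String :=
  let chars := st.1 ++ [char]
  if char = ' ' || check_mark char then
    ([], st.2 ++ [String.ofList (PySem.Chars.strip chars)])
  else (chars, st.2)

def word_tokenize (sentence : String) : List String :=
  (sentence.toList.foldl wtA_step ([], [])).2

-- ===== PORT B =====
def pvDelims : List Char := [' ', '?', '!', '.']

-- outer while loop of Source B: the inner index scan = takeWhile/dropWhile split at the first delimiter
def wtB_go (s : List Char) (words : List String) : List String :=
  let pre := s.takeWhile (fun c => !(pvDelims.contains c))
  match h : s.dropWhile (fun c => !(pvDelims.contains c)) with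
  | [] => words
  | d :: tl => wtB_go tl (words ++ [String.ofList (PySem.Chars.strip (pre ++ [d]))])
termination_by s.length
decreasing_by
  have h1 : (s.dropWhile (fun c => !(pvDelims.contains c))).length ≤ s.length :=
    List.length_dropWhile_le _ _
  rw [h] at h1
  simpa using Nat.lt_of_lt_of_le (Nat.lt_succ_self _) h1

def word_tokenize_alt (sentence : String) : List String :=
  wtB_go sentence.toList []

-- ===== PRECONDITION & SPEC =====
def Spec_word_tokenize (sentence : String) (out : List String) : Prop := out = word_tokenize_alt sentence
instance (sentence : String) (out : List String) : Decidable (Spec_word_tokenize sentence out) := by unfold Spec_word_tokenize; infer_instance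

-- ===== CLAIM (what is proved, stated in full; the proofs are below) =====
def Claim_equal_word_tokenize : Prop := ∀ (sentence : String), Dom_word_tokenize sentence → Spec_word_tokenize sentence (word_tokenize sentence)

-- ===== LEMMAS AND PROOFS =====

-- A's step, phrased by B's delimiter test
theorem wtA_step_eq (st : List Char × List String) (c : Char) :
    wtA_step st c =
      if pvDelims.contains c then
        ([], st.2 ++ [String.ofList (PySem.Chars.strip (st.1 ++ [c]))])
      else (st.1 ++ [c], st.2) := by
  have hdelim : (decide (c = ' ') || check_mark c) = pvDelims.contains c := by
    by_cases h1 : c = ' ' <;> by_cases h2 : c = '?' <;> by_cases h3 : c = '!' <;>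
      by_cases h4 : c = '.' <;> simp [check_mark, pvDelims, h1, h2, h3, h4]
  simp only [wtA_step, hdelim]

theorem takeWhile_append_all {α : Type} (p : α → Bool) (chars rest : List α)
    (h : chars.all p = true) :
    (chars ++ rest).takeWhile p = chars ++ rest.takeWhile p := by
  induction chars with
  | nil => simp
  | cons a l ih =>
    simp only [List.all_cons, Bool.and_eq_true] at h
    simp [h.1, ih h.2]

theorem dropWhile_append_all {α : Type} (p : α → Bool) (chars rest : List α)
    (h : chars.all p = true) :
    (chars ++ rest).dropWhile p = rest.dropWhile p := by
  induction chars with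
  | nil => simp
  | cons a l ih =>
    simp only [List.all_cons, Bool.and_eq_true] at h
    simp [h.1, ih h.2]

-- the loop invariant: folding A's step over cs with pending non-delimiter chars `chars`
-- equals B's token loop on `chars ++ cs`
theorem loop_eq (cs : List Char) : ∀ chars words,
    chars.all (fun c => !(pvDelims.contains c)) = true →
    (cs.foldl wtA_step (chars, words)).2 = wtB_go (chars ++ cs) words := by
  induction cs with
  | nil =>
    intro chars words hch
    rw [wtB_go]
    simp only [List.foldl_nil]
    split
    · rfl
    · rename_i d tl hcase
      rw [List.append_nil, List.dropWhile_eq_nil_iff.mpr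
        (fun c hc => by simpa using (List.all_eq_true.mp hch) c hc)] at hcase
      cases hcase
  | cons c cs ih =>
    intro chars words hch
    rw [List.foldl_cons, wtA_step_eq]
    by_cases hd : pvDelims.contains c
    · -- c is a delimiter: A emits the token; B's scan stops exactly at c
      have hd' : c ∈ pvDelims := by simpa using hd
      rw [if_pos hd, ih [] _ (by simp)]
      conv_rhs => rw [wtB_go]
      have htw : (chars ++ c :: cs).takeWhile (fun c => !(pvDelims.contains c)) = chars := by
        rw [takeWhile_append_all _ _ _ hch, List.takeWhile_cons]
        simp [hd']
      have hdw : (chars ++ c :: cs).dropWhile (fun c => !(pvDelims.contains c)) = c :: cs := by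
        rw [dropWhile_append_all _ _ _ hch, List.dropWhile_cons]
        simp [hd']
      simp only [htw]
      split
      · rename_i hcase; rw [hdw] at hcase; cases hcase
      · rename_i d tl hcase
        rw [hdw] at hcase
        injection hcase with h1 h2
        subst h1; subst h2; simp
    · -- c is not a delimiter: it joins the pending chars on both sides
      rw [if_neg hd, ih (chars ++ [c]) words
        (by simp only [List.all_append, List.all_cons, List.all_nil,
              Bool.and_eq_true, and_true]; exact ⟨hch, by simpa using hd⟩)]
      simp

-- ===== VERDICT (by name: the statement is the Claim_ definition above) =====
theorem word_tokenize_spec : Claim_equal_word_tokenize := by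
  intro s _
  unfold Spec_word_tokenize word_tokenize word_tokenize_alt
  simpa using loop_eq s.toList [] [] (by simp)
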